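-- pv_equiv track=rewrite | github.com/JuanCruzRodriguezKsenev/Calculadora-de-dias-trabajados | fechas.py | sumar_todos_los_periodos
-- ===== SOURCE A (Python) =====
-- def sumar_todos_los_periodos(lista_periodos):
--     """
--     Suma una lista de tuplas (año, mes, dia).
--     Normaliza usando criterio comercial: 30 días = 1 mes, 12 meses = 1 año.
--     """
--     total_a, total_m, total_d = 0, 0, 0
--
--     # 1. Suma bruta
--     for a, m, d in lista_periodos:
--         total_a += a
--         total_m += m
--         total_d += d
--
--     # 2. Normalizar Días (Base 30)
--     meses_extra, dias_restantes = divmod(total_d, 30)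
--     total_m += meses_extra
--     total_d = dias_restantes
--
--     # 3. Normalizar Meses (Base 12)
--     anios_extra, meses_restantes = divmod(total_m, 12)
--     total_a += anios_extra
--     total_m = meses_restantes
--
--     return total_a, total_m, total_d
-- ===== SOURCE B (Python) =====
-- def sumar_todos_los_periodos(lista_periodos):
--     """
--     Suma una lista de tuplas (anio, mes, dia) con criterio comercial
--     (30 dias = 1 mes, 12 meses = 1 anio) como un unico total en dias
--     base 360, descompuesto una sola vez al final.
--     """
--     total = sum(a * 360 + m * 30 + d for a, m, d in lista_periodos)
--     anios, resto = divmod(total, 360)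
--     meses, dias = divmod(resto, 30)
--     return anios, meses, dias
-- ===== Notes on version B (the rewrite author's own statement) =====
-- stated objective: simpler
-- what changed: Replaces the three parallel accumulators and two-stage carry normalization with one scalar day count (a*360+m*30+d) summed in a single pass and decomposed once by divmod base 360 then 30.
import Mathlib
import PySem

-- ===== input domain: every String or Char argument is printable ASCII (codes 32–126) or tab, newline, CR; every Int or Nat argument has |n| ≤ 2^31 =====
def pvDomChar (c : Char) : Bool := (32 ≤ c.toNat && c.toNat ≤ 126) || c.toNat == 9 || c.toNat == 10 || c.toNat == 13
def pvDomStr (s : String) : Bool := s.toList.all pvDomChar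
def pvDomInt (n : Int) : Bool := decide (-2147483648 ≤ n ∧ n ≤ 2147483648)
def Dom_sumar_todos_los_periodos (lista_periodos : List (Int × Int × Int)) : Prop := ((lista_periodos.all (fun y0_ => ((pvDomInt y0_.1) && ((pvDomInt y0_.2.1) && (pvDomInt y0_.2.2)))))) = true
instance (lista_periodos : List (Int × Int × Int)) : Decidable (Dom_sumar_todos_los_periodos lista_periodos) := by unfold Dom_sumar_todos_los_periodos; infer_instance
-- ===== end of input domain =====

-- B keeps one scalar day total (a*360+m*30+d) and decomposes it once, instead of A's
-- three accumulators and two-stage carry normalization; objective: simpler, same O(n).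

-- ===== PORT A =====
def sumar_todos_los_periodos (lista_periodos : List (Int × Int × Int)) : Int × Int × Int :=
  -- total_a, total_m, total_d = 0, 0, 0; for a, m, d in lista_periodos: ...
  let t := lista_periodos.foldl
    (fun (acc : Int × Int × Int) p => (acc.1 + p.1, acc.2.1 + p.2.1, acc.2.2 + p.2.2))
    (0, 0, 0)
  -- meses_extra, dias_restantes = divmod(total_d, 30)
  let meses_extra := PySem.Int.floordiv t.2.2 30
  let dias_restantes := PySem.Int.mod t.2.2 30
  let total_m := t.2.1 + meses_extra
  -- anios_extra, meses_restantes = divmod(total_m, 12)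
  let anios_extra := PySem.Int.floordiv total_m 12
  let meses_restantes := PySem.Int.mod total_m 12
  (t.1 + anios_extra, meses_restantes, dias_restantes)

-- ===== PORT B =====
def sumar_todos_los_periodos_alt (lista_periodos : List (Int × Int × Int)) : Int × Int × Int :=
  -- total = sum(a*360 + m*30 + d for a, m, d in lista_periodos)
  let total := (lista_periodos.map (fun p => p.1 * 360 + p.2.1 * 30 + p.2.2)).sum
  -- anios, resto = divmod(total, 360); meses, dias = divmod(resto, 30)
  let anios := PySem.Int.floordiv total 360
  let resto := PySem.Int.mod total 360
  (anios, PySem.Int.floordiv resto 30, PySem.Int.mod resto 30)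

-- ===== PRECONDITION & SPEC =====
def Spec_sumar_todos_los_periodos (lista_periodos : List (Int × Int × Int)) (out : Int × Int × Int) : Prop := out = sumar_todos_los_periodos_alt lista_periodos
instance (lista_periodos : List (Int × Int × Int)) (out : Int × Int × Int) : Decidable (Spec_sumar_todos_los_periodos lista_periodos out) := by unfold Spec_sumar_todos_los_periodos; infer_instance

-- ===== CLAIM (what is proved, stated in full; the proofs are below) =====
def Claim_equal_sumar_todos_los_periodos : Prop := ∀ (lista_periodos : List (Int × Int × Int)), Dom_sumar_todos_los_periodos lista_periodos → Spec_sumar_todos_los_periodos lista_periodos (sumar_todos_los_periodos lista_periodos)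

-- ===== LEMMAS AND PROOFS =====

-- A's three-accumulator fold computes the three componentwise sums.
theorem pv_foldl_sums (lp : List (Int × Int × Int)) (x y z : Int) :
    lp.foldl (fun (acc : Int × Int × Int) p => (acc.1 + p.1, acc.2.1 + p.2.1, acc.2.2 + p.2.2)) (x, y, z)
      = (x + (lp.map (·.1)).sum, y + (lp.map (·.2.1)).sum, z + (lp.map (·.2.2)).sum) := by
  induction lp generalizing x y z with
  | nil => simp
  | cons h t ih =>
    simp only [List.foldl_cons, ih, List.map_cons, List.sum_cons]
    refine Prod.ext ?_ (Prod.ext ?_ ?_) <;> simp <;> ring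

-- B's single scalar total is 360·(Σ years) + 30·(Σ months) + Σ days.
theorem pv_total_eq (lp : List (Int × Int × Int)) :
    (lp.map (fun p => p.1 * 360 + p.2.1 * 30 + p.2.2)).sum
      = (lp.map (·.1)).sum * 360 + (lp.map (·.2.1)).sum * 30 + (lp.map (·.2.2)).sum := by
  induction lp with
  | nil => simp
  | cons h t ih => simp [ih]; ring

-- the base-360 decomposition of 360·ta + 30·tm + td equals A's two-stage carry
theorem pv_arith (ta tm td : Int) :
    (ta + PySem.Int.floordiv (tm + PySem.Int.floordiv td 30) 12,
     PySem.Int.mod (tm + PySem.Int.floordiv td 30) 12,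
     PySem.Int.mod td 30)
    = (PySem.Int.floordiv (ta * 360 + tm * 30 + td) 360,
       PySem.Int.floordiv (PySem.Int.mod (ta * 360 + tm * 30 + td) 360) 30,
       PySem.Int.mod (PySem.Int.mod (ta * 360 + tm * 30 + td) 360) 30) := by
  simp only [PySem.Int.floordiv_eq_ediv_of_pos (by norm_num : (0:Int) < 30),
             PySem.Int.floordiv_eq_ediv_of_pos (by norm_num : (0:Int) < 12),
             PySem.Int.floordiv_eq_ediv_of_pos (by norm_num : (0:Int) < 360),
             PySem.Int.mod_eq_emod_of_pos (by norm_num : (0:Int) < 30),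
             PySem.Int.mod_eq_emod_of_pos (by norm_num : (0:Int) < 12),
             PySem.Int.mod_eq_emod_of_pos (by norm_num : (0:Int) < 360)]
  refine Prod.ext ?_ (Prod.ext ?_ ?_) <;> simp <;> omega

-- ===== VERDICT (by name: the statement is the Claim_ definition above) =====
theorem sumar_todos_los_periodos_spec : Claim_equal_sumar_todos_los_periodos := by
  intro lp _
  unfold Spec_sumar_todos_los_periodos sumar_todos_los_periodos sumar_todos_los_periodos_alt
  simp only [pv_foldl_sums, pv_total_eq, Int.zero_add]
  exact pv_arith _ _ _
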